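-- pv_equiv track=rewrite | github.com/jmsaavedrar/programacion | exams/eB4M3/examb4m3.py | obtener_total_marca_por_vendedor
-- ===== SOURCE A (Python) =====
-- def obtener_total_marca_por_vendedor(data):
--     dict = {}
--     for item in data :
--         marca = item['marca']
--         vendedor = item['vendedor']
--         if not vendedor in dict :
--             dict[vendedor] = {}
--         if not marca in dict[vendedor] :
--             dict[vendedor][marca] = 1
--         else :
--             dict[vendedor][marca] += 1
--     return dict
-- ===== SOURCE B (Python) =====
-- def obtener_total_marca_por_vendedor(data):
--     vendedores = list(dict.fromkeys(item['vendedor'] for item in data))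
--     result = {}
--     for v in vendedores:
--         marcas = [item['marca'] for item in data if item['vendedor'] == v]
--         result[v] = {m: marcas.count(m) for m in dict.fromkeys(marcas)}
--     return result
-- ===== Notes on version B (the rewrite author's own statement) =====
-- stated objective: alternative
-- what changed: A builds the nested dict incrementally with guard-and-increment per item; B first dedups the sellers (dict.fromkeys), then for each seller collects his brand list by comprehension and builds the inner dict with list.count over deduped brands.
import Mathlib
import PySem

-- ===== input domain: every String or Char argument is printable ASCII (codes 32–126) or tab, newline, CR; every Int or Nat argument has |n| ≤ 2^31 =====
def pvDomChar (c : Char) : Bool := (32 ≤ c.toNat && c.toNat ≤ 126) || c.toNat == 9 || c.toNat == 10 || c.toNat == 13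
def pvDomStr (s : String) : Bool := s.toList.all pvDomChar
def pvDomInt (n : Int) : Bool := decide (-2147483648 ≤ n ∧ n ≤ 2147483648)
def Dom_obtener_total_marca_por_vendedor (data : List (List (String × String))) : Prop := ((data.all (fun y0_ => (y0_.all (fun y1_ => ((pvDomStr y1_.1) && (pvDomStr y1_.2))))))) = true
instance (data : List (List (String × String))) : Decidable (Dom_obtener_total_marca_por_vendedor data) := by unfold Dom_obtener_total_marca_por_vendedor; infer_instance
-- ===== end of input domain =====

-- B replaces A's incremental nested guard-and-increment dict loop by a dedup-then-count decomposition: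
-- first-occurrence lists of sellers and of their brands, with counts taken by list.count. Objective: alternative.

-- item[k] : first-matching lookup (Python dict access); Pre_ guarantees the key is present
-- (Python raises KeyError otherwise), so the "" default is never reached inside Pre_.
def pvItemGet (item : List (String × String)) (k : String) : String :=
  ((PySem.Dict.mk item).get? k).getD ""

def vendOf (item : List (String × String)) : String := pvItemGet item "vendedor"
def marcOf (item : List (String × String)) : String := pvItemGet item "marca"

-- ===== PORT A =====
-- the body of A's for-loop, one item at a time
def stepA (d : PySem.Dict String (PySem.Dict String Int)) (item : List (String × String)) :
    PySem.Dict String (PySem.Dict String Int) :=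
  let marca := marcOf item
  let vendedor := vendOf item
  let d1 := if d.contains vendedor then d else d.insert vendedor PySem.Dict.empty
  let inner := d1.getD vendedor PySem.Dict.empty
  if !(inner.contains marca) then d1.insert vendedor (inner.insert marca 1)
  else d1.insert vendedor (inner.insert marca (inner.getD marca 0 + 1))

def obtener_total_marca_por_vendedor (data : List (List (String × String))) :
    List (String × List (String × Int)) :=
  ((data.foldl stepA PySem.Dict.empty).items).map (fun p => (p.1, p.2.items))

-- ===== PORT B =====
def obtener_total_marca_por_vendedor_alt (data : List (List (String × String))) :
    List (String × List (String × Int)) :=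
  let vendedores := PySem.Set.ofList (data.map vendOf)
  let result := vendedores.foldl
    (fun r v =>
      let marcas := (data.filter (fun item => vendOf item == v)).map marcOf
      r.insert v ((PySem.Set.ofList marcas).foldl
        (fun i m => i.insert m ((marcas.count m : Int))) PySem.Dict.empty))
    PySem.Dict.empty
  result.items.map (fun p => (p.1, p.2.items))

-- ===== PRECONDITION & SPEC =====
-- Pre_ excludes exactly the inputs where Python's A raises KeyError: an item lacking key "marca" or "vendedor".
def Pre_obtener_total_marca_por_vendedor (data : List (List (String × String))) : Prop :=
  ∀ item ∈ data, "marca" ∈ item.map Prod.fst ∧ "vendedor" ∈ item.map Prod.fst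
instance (data : List (List (String × String))) : Decidable (Pre_obtener_total_marca_por_vendedor data) := by
  unfold Pre_obtener_total_marca_por_vendedor; infer_instance
def pvWitness_obtener_total_marca_por_vendedor : (List (List (String × String))) :=
  ([[("marca", "a"), ("vendedor", "b")], [("vendedor", "b"), ("marca", "c")]])

def Spec_obtener_total_marca_por_vendedor (data : List (List (String × String))) (out : List (String × List (String × Int))) : Prop := out = obtener_total_marca_por_vendedor_alt data
instance (data : List (List (String × String))) (out : List (String × List (String × Int))) : Decidable (Spec_obtener_total_marca_por_vendedor data out) := by unfold Spec_obtener_total_marca_por_vendedor; infer_instance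

-- ===== CLAIM (what is proved, stated in full; the proofs are below) =====
def Claim_equal_obtener_total_marca_por_vendedor : Prop := ∀ (data : List (List (String × String))), Dom_obtener_total_marca_por_vendedor data → Pre_obtener_total_marca_por_vendedor data → Spec_obtener_total_marca_por_vendedor data (obtener_total_marca_por_vendedor data)

-- ===== LEMMAS AND PROOFS =====

-- the brands (with multiplicity, in order) sold by seller v
def msOf (data : List (List (String × String))) (v : String) : List String :=
  (data.filter (fun it => vendOf it == v)).map marcOf

-- the inner dict A builds for seller v, in closed form
def innerD (data : List (List (String × String))) (v : String) : PySem.Dict String Int :=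
  PySem.Dict.mk ((PySem.Set.ofList (msOf data v)).map (fun m => (m, ((msOf data v).count m : Int))))

lemma msOf_append (xs : List (List (String × String))) (x : List (String × String)) (v : String) :
    msOf (xs ++ [x]) v = if vendOf x = v then msOf xs v ++ [marcOf x] else msOf xs v := by
  by_cases h : vendOf x = v <;> simp [msOf, List.filter_append, h]

lemma innerD_append_ne (xs : List (List (String × String))) (x : List (String × String))
    (v : String) (h : vendOf x ≠ v) : innerD (xs ++ [x]) v = innerD xs v := by
  simp [innerD, msOf_append, h]

lemma innerD_keys (data : List (List (String × String))) (v : String) :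
    (innerD data v).keys = PySem.Set.ofList (msOf data v) := by
  simp [innerD, PySem.Dict.keys, List.map_map, Function.comp_def]

lemma innerD_keys_nodup (data : List (List (String × String))) (v : String) :
    (innerD data v).keys.Nodup := by
  rw [innerD_keys]; exact PySem.Set.nodup_ofList _

lemma innerD_contains (data : List (List (String × String))) (v m : String) :
    (innerD data v).contains m = decide (m ∈ msOf data v) := by
  simp [innerD, PySem.Dict.contains_mk, List.any_map, Function.comp_def, List.any_beq',
    PySem.Set.mem_ofList]

lemma innerD_getD_of_mem (data : List (List (String × String))) (v m : String)
    (h : m ∈ msOf data v) : (innerD data v).getD m 0 = ((msOf data v).count m : Int) := by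
  refine PySem.Dict.getD_of_mem_items _ ?_ (innerD_keys_nodup data v) 0
  exact List.mem_map_of_mem ((PySem.Set.mem_ofList _ _).2 h)

-- the crux: appending one more sale of seller v0 bumps exactly its brand's count
lemma innerD_append_self (xs : List (List (String × String))) (x : List (String × String)) :
    innerD (xs ++ [x]) (vendOf x)
      = (innerD xs (vendOf x)).insert (marcOf x)
          ((innerD xs (vendOf x)).getD (marcOf x) 0 + 1) := by
  have hms' : msOf (xs ++ [x]) (vendOf x) = msOf xs (vendOf x) ++ [marcOf x] := by
    rw [msOf_append, if_pos rfl]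
  apply PySem.Dict.ext
  by_cases hm : marcOf x ∈ msOf xs (vendOf x)
  · have hof : PySem.Set.ofList (msOf xs (vendOf x) ++ [marcOf x])
        = PySem.Set.ofList (msOf xs (vendOf x)) := by
      rw [PySem.Set.ofList_append, PySem.Set.update_cons, PySem.Set.update_nil,
        PySem.Set.add, if_pos]
      simpa [List.contains_iff_mem, PySem.Set.mem_ofList] using hm
    rw [PySem.Dict.items_insert_of_contains _ _ (by simp [innerD_contains, hm]),
      innerD_getD_of_mem xs (vendOf x) (marcOf x) hm]
    simp only [innerD, hms', hof, List.map_map]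
    refine List.map_congr_left (fun m hmem => ?_)
    by_cases he : m = marcOf x
    · subst he
      simp [List.count_append]
    · simp [he, List.count_append, Ne.symm he]
  · have hof : PySem.Set.ofList (msOf xs (vendOf x) ++ [marcOf x])
        = PySem.Set.ofList (msOf xs (vendOf x)) ++ [marcOf x] := by
      rw [PySem.Set.ofList_append, PySem.Set.update_cons, PySem.Set.update_nil,
        PySem.Set.add, if_neg]
      simpa [List.contains_iff_mem, PySem.Set.mem_ofList] using hm
    have hc : (innerD xs (vendOf x)).contains (marcOf x) = false := by
      simp [innerD_contains, hm]
    rw [PySem.Dict.items_insert_of_not_contains _ _ hc,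
      PySem.Dict.getD_of_not_contains _ _ hc]
    simp only [innerD, hms', hof, List.map_append]
    congr 1
    · refine List.map_congr_left (fun m hmem => ?_)
      have he : m ≠ marcOf x := fun h => hm (h ▸ (PySem.Set.mem_ofList _ _).1 hmem)
      simp [List.count_append, Ne.symm he]
    · simp [List.count_eq_zero_of_not_mem hm, List.count_append]

lemma foldA_items (data : List (List (String × String))) :
    (data.foldl stepA PySem.Dict.empty).items
      = (PySem.Set.ofList (data.map vendOf)).map (fun v => (v, innerD data v)) := by
  induction data using List.reverseRecOn with
  | nil => rfl
  | append_singleton xs x ih =>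
    rw [List.foldl_append, List.foldl_cons, List.foldl_nil]
    set d := xs.foldl stepA PySem.Dict.empty with hd
    set S := PySem.Set.ofList (xs.map vendOf) with hS
    have hkeys : d.keys = S := by
      simp [PySem.Dict.keys, ih, List.map_map, Function.comp_def]
    have hnd : d.keys.Nodup := hkeys ▸ PySem.Set.nodup_ofList _
    have hS' : PySem.Set.ofList ((xs ++ [x]).map vendOf) = S.add (vendOf x) := by
      rw [List.map_append]
      simp only [List.map_cons, List.map_nil]
      rw [PySem.Set.ofList_append, PySem.Set.update_cons, PySem.Set.update_nil]
    rw [hS']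
    by_cases hv : vendOf x ∈ S
    · have hcont0 : d.contains (vendOf x) = true := by
        rw [PySem.Dict.contains_eq_decide_mem_keys, hkeys]; simp [hv]
      have hadd : S.add (vendOf x) = S := by
        rw [PySem.Set.add, if_pos]
        simpa [PySem.Set.contains, List.contains_iff_mem] using hv
      have hmem : (vendOf x, innerD xs (vendOf x)) ∈ d.items := by
        rw [ih]; exact List.mem_map_of_mem hv
      have hinner : d.getD (vendOf x) PySem.Dict.empty = innerD xs (vendOf x) :=
        PySem.Dict.getD_of_mem_items d hmem hnd _
      have key : stepA d x
          = d.insert (vendOf x)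
              ((innerD xs (vendOf x)).insert (marcOf x)
                ((innerD xs (vendOf x)).getD (marcOf x) 0 + 1)) := by
        rw [stepA]
        simp only [hcont0, if_true, hinner]
        by_cases hm : marcOf x ∈ msOf xs (vendOf x)
        · simp [innerD_contains, hm]
        · have hc : (innerD xs (vendOf x)).contains (marcOf x) = false := by
            simp [innerD_contains, hm]
          simp [hc, PySem.Dict.getD_of_not_contains _ _ hc]
      rw [key, hadd,
        PySem.Dict.items_insert_of_contains _ _ hcont0, ih, List.map_map]
      refine List.map_congr_left (fun v hv' => ?_)
      by_cases he : v = vendOf x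
      · subst he
        simp [Function.comp, innerD_append_self]
      · simp [Function.comp, (by simpa using he : (v == vendOf x) = false),
          innerD_append_ne xs x v (fun h => he h.symm)]
    · have hcont0 : d.contains (vendOf x) = false := by
        rw [PySem.Dict.contains_eq_decide_mem_keys, hkeys]; simp [hv]
      have hadd : S.add (vendOf x) = S ++ [vendOf x] := by
        rw [PySem.Set.add, if_neg]
        simpa [PySem.Set.contains, List.contains_iff_mem] using hv
      have hnil : msOf xs (vendOf x) = [] := by
        rw [msOf, List.map_eq_nil_iff, List.filter_eq_nil_iff]
        intro it hit hbeq
        have hveq : vendOf it = vendOf x := by simpa using hbeq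
        exact hv ((PySem.Set.mem_ofList _ _).2 (hveq ▸ List.mem_map_of_mem hit))
      have key : stepA d x
          = d.insert (vendOf x) (PySem.Dict.empty.insert (marcOf x) 1) := by
        rw [stepA]
        simp only [hcont0, if_false, Bool.false_eq_true,
          PySem.Dict.getD_insert_self, PySem.Dict.contains_empty,
          Bool.not_false, if_true]
        exact PySem.Dict.insert_insert_self _ _ _ _
      have hlast : innerD (xs ++ [x]) (vendOf x) = PySem.Dict.empty.insert (marcOf x) 1 := by
        apply PySem.Dict.ext
        rw [PySem.Dict.items_insert_of_not_contains _ _ (PySem.Dict.contains_empty _)]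
        simp [innerD, msOf_append, hnil, PySem.Set.ofList, PySem.Set.add,
          PySem.Dict.empty]
      rw [key, hadd, PySem.Dict.items_insert_of_not_contains _ _ hcont0, ih,
        List.map_append]
      congr 1
      · refine List.map_congr_left (fun v hv' => ?_)
        have he : vendOf x ≠ v := fun h => hv (h ▸ hv')
        rw [innerD_append_ne xs x v he]
      · simp [hlast]

lemma inner_items (marcas : List String) :
    ((PySem.Set.ofList marcas).foldl
        (fun i m => i.insert m ((marcas.count m : Int))) PySem.Dict.empty).items
      = (PySem.Set.ofList marcas).map (fun m => (m, (marcas.count m : Int))) := by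
  have h := PySem.Dict.items_foldl_insert_fresh (PySem.Set.ofList marcas)
      (fun m => m) (fun m => ((marcas.count m : Int))) PySem.Dict.empty
      (fun a _ => PySem.Dict.contains_empty a)
      (by simp [PySem.Set.nodup_ofList])
  simpa using h

lemma altB_eq (data : List (List (String × String))) :
    obtener_total_marca_por_vendedor_alt data
      = (PySem.Set.ofList (data.map vendOf)).map (fun v => (v, (innerD data v).items)) := by
  unfold obtener_total_marca_por_vendedor_alt
  dsimp only
  have h := PySem.Dict.items_foldl_insert_fresh (PySem.Set.ofList (data.map vendOf))
      (fun v => v)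
      (fun v => ((PySem.Set.ofList (msOf data v)).foldl
        (fun i m => i.insert m (((msOf data v).count m : Int))) PySem.Dict.empty))
      PySem.Dict.empty
      (fun a _ => PySem.Dict.contains_empty a)
      (by simp [PySem.Set.nodup_ofList])
  simp only [msOf] at h
  rw [h]
  rw [show (PySem.Dict.empty : PySem.Dict String (PySem.Dict String Int)).items = [] from rfl,
      List.nil_append, List.map_map]
  refine List.map_congr_left (fun v hv => ?_)
  simp only [Function.comp]
  rw [show ((data.filter (fun it => vendOf it == v)).map marcOf) = msOf data v from rfl,
      inner_items (msOf data v)]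
  rfl

-- ===== VERDICT (by name: the statement is the Claim_ definition above) =====
theorem obtener_total_marca_por_vendedor_spec : Claim_equal_obtener_total_marca_por_vendedor := by
  intro data _ _
  show obtener_total_marca_por_vendedor data = obtener_total_marca_por_vendedor_alt data
  rw [obtener_total_marca_por_vendedor, foldA_items, altB_eq, List.map_map]
  rfl
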